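-- pv_equiv track=rewrite | github.com/Alexmdg/DashApplication-TestAlgorithms | AlgoWebSite/DashApps/algos/Dunod/list_sorting.py | maxTabCroise
-- ===== SOURCE A (Python) =====
-- def maxTabCroise(var_liste, bas, haut):
--     haut = haut
--     max_var = var_liste[0]
--     var = 0
--     for i in range(len(var_liste)):
--         var = var + var_liste[i]
--         if var >= max_var:
--             max_var = var
--             haut = i
--
--     bas = bas
--     var = 0
--     max_var = 0
--     for i in range(len(var_liste[:haut]), -1, -1):
--         var = var + var_liste[i]
--         if var >= max_var:
--             max_var = var
--             bas = i
--
--     return bas, haut, max_var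
-- ===== SOURCE B (Python) =====
-- def maxTabCroise(var_liste, bas, haut):
--     # prefix sums once; haut = last argmax of the prefix array;
--     # the best backward sum ending at haut = prefix[haut] - min eligible baseline
--     prefix = []
--     s = 0
--     for x in var_liste:
--         s += x
--         prefix.append(s)
--     m = max(prefix)                      # raises on empty input, like A's var_liste[0]
--     haut = len(prefix) - 1 - prefix[::-1].index(m)
--     base = [0] + prefix[:haut]           # base[i] = prefix sum before index i
--     lo = min(base)
--     best = prefix[haut] - lo
--     if best >= 0:
--         return base.index(lo), haut, best
--     return bas, haut, 0
-- ===== Notes on version B (the rewrite author's own statement) =====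
-- stated objective: alternative
-- what changed: B builds the prefix-sum array once and replaces both of A's accumulating scan loops by closed-form extractions: haut is the last argmax of the prefix array (max + index on the reversed list), and the backward result is prefix[haut] minus the first minimum of the baseline prefix values, instead of re-accumulating backward from haut.
import Mathlib
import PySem

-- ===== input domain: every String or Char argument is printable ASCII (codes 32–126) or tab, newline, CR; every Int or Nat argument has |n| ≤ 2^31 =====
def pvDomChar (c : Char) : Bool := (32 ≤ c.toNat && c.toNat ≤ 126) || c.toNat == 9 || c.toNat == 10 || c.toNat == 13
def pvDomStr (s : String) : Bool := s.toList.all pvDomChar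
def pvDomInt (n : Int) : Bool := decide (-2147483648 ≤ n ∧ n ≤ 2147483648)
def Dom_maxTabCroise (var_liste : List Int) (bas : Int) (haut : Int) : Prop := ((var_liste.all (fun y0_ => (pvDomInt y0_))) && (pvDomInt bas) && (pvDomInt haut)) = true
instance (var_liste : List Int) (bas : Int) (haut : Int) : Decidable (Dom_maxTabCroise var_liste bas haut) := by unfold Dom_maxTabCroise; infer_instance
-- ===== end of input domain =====

-- B replaces A's two accumulating scans by one prefix-sum array plus closed-form
-- max/min/index extractions (objective: alternative decomposition, same O(n) cost).

-- ===== PORT A =====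
def maxTabCroise (var_liste : List Int) (bas : Int) (haut : Int) : Int × Int × Int :=
  -- max_var = var_liste[0]  (IndexError on []: excluded by Pre_)
  let max_var0 : Int := PySem.List.pyGetD var_liste 0 0
  -- for i in range(len(var_liste)): var += var_liste[i]; if var >= max_var: max_var, haut = var, i
  let s1 := (PySem.List.pyRange 0 (var_liste.length : Int) 1).foldl
      (fun (st : Int × Int × Int) i =>
        let var := st.2.1 + PySem.List.pyGetD var_liste i 0
        if var ≥ st.1 then (var, var, i) else (st.1, var, st.2.2))
      (max_var0, 0, haut)
  let haut1 := s1.2.2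
  -- for i in range(len(var_liste[:haut]), -1, -1): var += var_liste[i]; if var >= max_var: max_var, bas = var, i
  let s2 := (PySem.List.pyRange ((PySem.List.slice var_liste none (some haut1)).length : Int) (-1) (-1)).foldl
      (fun (st : Int × Int × Int) i =>
        let var := st.2.1 + PySem.List.pyGetD var_liste i 0
        if var ≥ st.1 then (var, var, i) else (st.1, var, st.2.2))
      ((0 : Int), (0 : Int), bas)
  (s2.2.2, haut1, s2.1)

-- ===== PORT B =====
def maxTabCroise_alt (var_liste : List Int) (bas : Int) (haut : Int) : Int × Int × Int :=
  -- prefix = []; s = 0; for x in var_liste: s += x; prefix.append(s)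
  let pfx := (var_liste.foldl (fun (acc : List Int × Int) x =>
      (acc.1 ++ [acc.2 + x], acc.2 + x)) (([] : List Int), (0 : Int))).1
  -- m = max(prefix)  (ValueError on []: excluded by Pre_)
  let m := (PySem.List.max? pfx (fun y => y)).getD 0
  -- haut = len(prefix) - 1 - prefix[::-1].index(m)
  let h : Int := (pfx.length : Int) - 1 -
      ((PySem.List.index? ((PySem.List.slice? pfx none none (-1)).getD []) m).getD 0 : Nat)
  -- base = [0] + prefix[:haut]
  let base := 0 :: PySem.List.slice pfx none (some h)
  -- lo = min(base); best = prefix[haut] - lo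
  let lo := (PySem.List.min? base (fun y => y)).getD 0
  let best := PySem.List.pyGetD pfx h 0 - lo
  if best ≥ 0 then (((PySem.List.index? base lo).getD 0 : Nat), h, best)
  else (bas, h, 0)

-- ===== PRECONDITION & SPEC =====
-- Pre_ excludes exactly the empty list, on which A raises IndexError (var_liste[0]).
def Pre_maxTabCroise (var_liste : List Int) (bas : Int) (haut : Int) : Prop := var_liste ≠ []
instance (var_liste : List Int) (bas : Int) (haut : Int) : Decidable (Pre_maxTabCroise var_liste bas haut) := by unfold Pre_maxTabCroise; infer_instance
def pvWitness_maxTabCroise : List Int × Int × Int := ([1, -2, 3], 0, 0)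

def Spec_maxTabCroise (var_liste : List Int) (bas : Int) (haut : Int) (out : Int × Int × Int) : Prop := out = maxTabCroise_alt var_liste bas haut
instance (var_liste : List Int) (bas : Int) (haut : Int) (out : Int × Int × Int) : Decidable (Spec_maxTabCroise var_liste bas haut out) := by unfold Spec_maxTabCroise; infer_instance

-- ===== CLAIM (what is proved, stated in full; the proofs are below) =====
def Claim_equal_maxTabCroise : Prop := ∀ (var_liste : List Int) (bas : Int) (haut : Int), Dom_maxTabCroise var_liste bas haut → Pre_maxTabCroise var_liste bas haut → Spec_maxTabCroise var_liste bas haut (maxTabCroise var_liste bas haut)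

-- ===== LEMMAS AND PROOFS =====

-- pvS lst k = sum of the first k elements of lst (the k-th prefix sum; pvS lst 0 = 0)
def pvS (lst : List Int) (k : Nat) : Int := (lst.take k).sum

-- last-argmax scan of the prefix sums pvS (·+1), the value/index A's first loop maintains
def pvBmx (lst : List Int) : Nat → Int × Nat
  | 0 => (pvS lst 1, 0)
  | t+1 => let p := pvBmx lst t
           if pvS lst (t+2) ≥ p.1 then (pvS lst (t+2), t+1) else p

-- first-argmin scan of the baselines pvS, the value/index B's min/index compute
def pvMs (lst : List Int) : Nat → Int × Nat
  | 0 => ((0 : Int), 0)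
  | t+1 => let p := pvMs lst t
           if p.1 ≤ pvS lst (t+1) then p else (pvS lst (t+1), t+1)

-- A's second loop as a recursion on the countdown index
def pvDown (lst : List Int) : Nat → Int → Int → Int → Int × Int × Int
  | 0, m, v, b =>
      let v' := v + lst.getD 0 0
      if v' ≥ m then (v', v', 0) else (m, v', b)
  | t+1, m, v, b =>
      let v' := v + lst.getD (t+1) 0
      if v' ≥ m then pvDown lst t v' v' ((t+1 : Nat) : Int) else pvDown lst t m v' b

lemma pvS_zero (lst : List Int) : pvS lst 0 = 0 := by simp [pvS]

lemma getD_S (lst : List Int) (k : Nat) (h : k < lst.length) :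
    lst.getD k 0 = pvS lst (k+1) - pvS lst k := by
  unfold pvS
  rw [List.sum_take_succ _ _ h]
  simp [List.getD, List.getElem?_eq_getElem h]

-- B's prefix-building loop produces the map of prefix sums
lemma build_eq (lst : List Int) : ∀ (A : List Int) (s : Int),
    (lst.foldl (fun (acc : List Int × Int) x => (acc.1 ++ [acc.2 + x], acc.2 + x)) (A, s)).1 =
    A ++ (List.range lst.length).map (fun k => s + pvS lst (k+1)) := by
  induction lst with
  | nil => intro A s; simp
  | cons x xs ih =>
    intro A s
    simp only [List.foldl_cons]
    rw [ih (A ++ [s + x]) (s + x)]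
    rw [List.length_cons, List.range_succ_eq_map]
    simp [List.map_map, Function.comp, pvS]
    intro a _
    ring

lemma max?_id_append_singleton (L : List Int) (m x : Int)
    (h : PySem.List.max? L (fun y => y) = some m) :
    PySem.List.max? (L ++ [x]) (fun y => y) = some (max m x) := by
  have hL : L ≠ [] := by
    intro e; rw [e] at h; simp [PySem.List.max?] at h
  obtain ⟨a, T, rfl⟩ := List.exists_cons_of_ne_nil hL
  rw [PySem.List.max?_id_cons] at h
  rw [List.cons_append, PySem.List.max?_id_cons, List.foldl_append]
  simp at h ⊢
  omega

lemma min?_id_append_singleton (L : List Int) (m x : Int)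
    (h : PySem.List.min? L (fun y => y) = some m) :
    PySem.List.min? (L ++ [x]) (fun y => y) = some (min m x) := by
  have hL : L ≠ [] := by
    intro e; rw [e] at h; simp [PySem.List.min?] at h
  obtain ⟨a, T, rfl⟩ := List.exists_cons_of_ne_nil hL
  rw [PySem.List.min?_id_cons] at h
  rw [List.cons_append, PySem.List.min?_id_cons, List.foldl_append]
  simp at h ⊢
  omega

lemma bmx_spec (lst : List Int) : ∀ t, t < lst.length →
    (pvBmx lst t).2 ≤ t ∧
    PySem.List.max? ((List.range (t+1)).map (fun k => pvS lst (k+1))) (fun y => y) = some (pvBmx lst t).1 ∧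
    PySem.List.index? ((List.range (t+1)).map (fun k => pvS lst (k+1))).reverse (pvBmx lst t).1 = some (t - (pvBmx lst t).2) := by
  intro t
  induction t with
  | zero =>
    intro _
    refine ⟨le_refl 0, ?_, ?_⟩
    · simp [pvBmx, PySem.List.max?_id_cons, List.range_succ]
    · simp [pvBmx, List.range_succ]
  | succ t ih =>
    intro ht
    obtain ⟨h2le, hmax, hidx⟩ := ih (by omega)
    have hsnoc : (List.range (t+1+1)).map (fun k => pvS lst (k+1)) =
        (List.range (t+1)).map (fun k => pvS lst (k+1)) ++ [pvS lst (t+2)] := by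
      rw [List.range_succ]; simp
    have hrev : ((List.range (t+1+1)).map (fun k => pvS lst (k+1))).reverse =
        pvS lst (t+2) :: ((List.range (t+1)).map (fun k => pvS lst (k+1))).reverse := by
      rw [hsnoc]; simp
    by_cases hc : pvS lst (t+2) ≥ (pvBmx lst t).1
    · have hb : pvBmx lst (t+1) = (pvS lst (t+2), t+1) := by
        simp [pvBmx, hc]
      refine ⟨by rw [hb], ?_, ?_⟩
      · rw [hb, hsnoc, max?_id_append_singleton _ _ _ hmax]
        simp; omega
      · rw [hb, hrev]
        simp [List.idxOf?_cons]
    · have hb : pvBmx lst (t+1) = pvBmx lst t := by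
        simp [pvBmx, hc]
      refine ⟨by rw [hb]; omega, ?_, ?_⟩
      · rw [hb, hsnoc, max?_id_append_singleton _ _ _ hmax]
        simp; omega
      · rw [hb, hrev]
        simp only [PySem.List.index?_eq_idxOf?] at hidx ⊢
        rw [List.idxOf?_cons]
        simp only [show ((pvS lst (t+2)) == (pvBmx lst t).1) = false by simp; omega,
          Bool.false_eq_true, if_false, hidx]
        simp; omega

lemma ms_spec (lst : List Int) : ∀ t,
    (pvMs lst t).2 ≤ t ∧
    PySem.List.min? ((List.range (t+1)).map (fun k => pvS lst k)) (fun y => y) = some (pvMs lst t).1 ∧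
    PySem.List.index? ((List.range (t+1)).map (fun k => pvS lst k)) (pvMs lst t).1 = some (pvMs lst t).2 := by
  intro t
  induction t with
  | zero =>
    refine ⟨le_refl 0, ?_, ?_⟩
    · simp [pvMs, PySem.List.min?_id_cons, List.range_succ, pvS]
    · simp [pvMs, List.range_succ, pvS]
  | succ t ih =>
    obtain ⟨h2le, hmin, hidx⟩ := ih
    have hsnoc : (List.range (t+1+1)).map (fun k => pvS lst k) =
        (List.range (t+1)).map (fun k => pvS lst k) ++ [pvS lst (t+1)] := by
      rw [List.range_succ]; simp
    have hlen : ((List.range (t+1)).map (fun k => pvS lst k)).length = t + 1 := by simp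
    by_cases hc : (pvMs lst t).1 ≤ pvS lst (t+1)
    · have hb : pvMs lst (t+1) = pvMs lst t := by simp [pvMs, hc]
      have hmem : (pvMs lst t).1 ∈ (List.range (t+1)).map (fun k => pvS lst k) :=
        PySem.List.min?_mem hmin
      refine ⟨by rw [hb]; omega, ?_, ?_⟩
      · rw [hb, hsnoc, min?_id_append_singleton _ _ _ hmin]
        simp; omega
      · simp only [hb, hsnoc]
        rw [PySem.List.index?_append_of_mem _ hmem, hidx]
    · have hb : pvMs lst (t+1) = (pvS lst (t+1), t+1) := by simp [pvMs, hc]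
      have hnot : pvS lst (t+1) ∉ (List.range (t+1)).map (fun k => pvS lst k) := by
        intro hm
        have := PySem.List.min?_isMin hmin _ hm
        simp at this; omega
      refine ⟨by rw [hb], ?_, ?_⟩
      · rw [hb, hsnoc, min?_id_append_singleton _ _ _ hmin]
        simp; omega
      · simp only [hb, hsnoc]
        rw [PySem.List.index?_append_singleton_self _ _ hnot, hlen]

lemma loop1_spec (lst : List Int) (h0 : Int) : ∀ k, k < lst.length →
    (PySem.List.pyRange 0 ((k : Int)+1) 1).foldl
      (fun (st : Int × Int × Int) i =>
        let var := st.2.1 + PySem.List.pyGetD lst i 0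
        if var ≥ st.1 then (var, var, i) else (st.1, var, st.2.2))
      (pvS lst 1, 0, h0)
    = ((pvBmx lst k).1, pvS lst (k+1), ((pvBmx lst k).2 : Int)) := by
  intro k
  induction k with
  | zero =>
    intro hk
    have h1 : PySem.List.pyRange 0 1 1 = [0] := by decide
    rw [show ((0:Nat):Int) + 1 = 1 by norm_num, h1]
    simp only [List.foldl_cons, List.foldl_nil, PySem.List.pyGetD_zero]
    rw [getD_S lst 0 hk]
    simp [pvBmx, pvS]
  | succ k ih =>
    intro hk
    have hsplit : PySem.List.pyRange 0 (((k+1:Nat) : Int)+1) 1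
        = PySem.List.pyRange 0 ((k:Int)+1) 1 ++ [((k:Int)+1)] := by
      push_cast
      exact PySem.List.pyRange_one_succ_right (by omega)
    rw [hsplit, List.foldl_append, ih (by omega)]
    have hget : PySem.List.pyGetD lst ((k:Int)+1) 0 = pvS lst (k+2) - pvS lst (k+1) := by
      rw [show ((k:Int)+1) = ((k+1:Nat):Int) by push_cast; ring, PySem.List.pyGetD_natCast]
      exact getD_S lst (k+1) hk
    simp only [List.foldl_cons, List.foldl_nil, hget]
    by_cases hc : pvS lst (k+2) ≥ (pvBmx lst k).1
    · simp [pvBmx, hc]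
    · simp [pvBmx, hc]

lemma pyRange_countdown_succ (t : Nat) :
    PySem.List.pyRange ((t : Int)+1) (-1) (-1) = ((t : Int)+1) :: PySem.List.pyRange (t : Int) (-1) (-1) := by
  rw [PySem.List.pyRange_neg_one, PySem.List.pyRange_neg_one]
  have h1 : (((t:Int)+1) - (-1)).toNat = t + 2 := by omega
  have h2 : ((t:Int) - (-1)).toNat = t + 1 := by omega
  rw [h1, h2, List.range_succ_eq_map]
  simp [List.map_map, Function.comp]

lemma loop2_spec (lst : List Int) : ∀ (t : Nat) (m v b : Int),
    (PySem.List.pyRange (t : Int) (-1) (-1)).foldl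
      (fun (st : Int × Int × Int) i =>
        let var := st.2.1 + PySem.List.pyGetD lst i 0
        if var ≥ st.1 then (var, var, i) else (st.1, var, st.2.2))
      (m, v, b)
    = pvDown lst t m v b := by
  intro t
  induction t with
  | zero =>
    intro m v b
    have h1 : PySem.List.pyRange 0 (-1) (-1) = [0] := by decide
    rw [show ((0:Nat):Int) = 0 by norm_num, h1]
    simp only [List.foldl_cons, List.foldl_nil, PySem.List.pyGetD_zero, pvDown]
  | succ t ih =>
    intro m v b
    rw [show ((t+1:Nat):Int) = (t:Int)+1 by push_cast; ring, pyRange_countdown_succ, List.foldl_cons]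
    have hget : PySem.List.pyGetD lst ((t:Int)+1) 0 = lst.getD (t+1) 0 := by
      rw [show ((t:Int)+1) = ((t+1:Nat):Int) by push_cast; ring, PySem.List.pyGetD_natCast]
    simp only [hget, pvDown]
    split_ifs with h
    · rw [ih]; push_cast; ring_nf
    · rw [ih]

lemma down_spec (lst : List Int) : ∀ t, t < lst.length → ∀ (m v b : Int),
    pvDown lst t m v b =
      (max m (v + pvS lst (t+1) - (pvMs lst t).1),
       v + pvS lst (t+1),
       if (pvMs lst t).1 ≤ v + pvS lst (t+1) - m then (((pvMs lst t).2 : Nat) : Int) else b) := by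
  intro t
  induction t with
  | zero =>
    intro h0 m v b
    rw [pvDown, getD_S lst 0 h0]
    have h00 : pvS lst 0 = 0 := by simp [pvS]
    have h01 : pvS lst (0+1) = pvS lst 1 := by norm_num
    simp only [pvMs, h00, h01]
    rw [Prod.mk.injEq, Prod.mk.injEq]
    split_ifs <;> refine ⟨by omega, by omega, ?_⟩ <;> simp <;> omega
  | succ t ih =>
    intro ht m v b
    have e2 : pvS lst (t+1+1) = pvS lst (t+2) := by norm_num
    have hms : pvMs lst (t+1) = if (pvMs lst t).1 ≤ pvS lst (t+1) then pvMs lst t else (pvS lst (t+1), t+1) := rfl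
    rw [pvDown, getD_S lst (t+1) (by omega), hms, e2]
    by_cases hm : (pvMs lst t).1 ≤ pvS lst (t+1) <;>
      simp only [hm, if_pos, if_false] <;>
      split_ifs with hc <;>
      rw [ih (by omega)] <;>
      rw [Prod.mk.injEq, Prod.mk.injEq] <;>
      refine ⟨by omega, by ring, ?_⟩ <;>
      split_ifs <;> push_cast <;> omega

-- ===== VERDICT (by name: the statement is the Claim_ definition above) =====
theorem maxTabCroise_spec : Claim_equal_maxTabCroise := by
  intro lst bas haut _ hpre
  unfold Pre_maxTabCroise at hpre
  unfold Spec_maxTabCroise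
  have hn : 1 ≤ lst.length := List.length_pos_iff.mpr hpre
  obtain ⟨hHle, hmax, hidx⟩ := bmx_spec lst (lst.length - 1) (by omega)
  rw [show lst.length - 1 + 1 = lst.length by omega] at hmax hidx
  obtain ⟨hMle, hmin, hmidx⟩ := ms_spec lst (pvBmx lst (lst.length - 1)).2
  have hseed : PySem.List.pyGetD lst 0 0 = pvS lst 1 := by
    rw [PySem.List.pyGetD_zero, getD_S lst 0 hn]
    simp [pvS_zero]
  -- A's side
  have hA : maxTabCroise lst bas haut =
      (if (pvMs lst (pvBmx lst (lst.length - 1)).2).1 ≤ pvS lst ((pvBmx lst (lst.length - 1)).2 + 1)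
         then (((pvMs lst (pvBmx lst (lst.length - 1)).2).2 : Nat) : Int) else bas,
       (((pvBmx lst (lst.length - 1)).2 : Nat) : Int),
       max 0 (pvS lst ((pvBmx lst (lst.length - 1)).2 + 1) - (pvMs lst (pvBmx lst (lst.length - 1)).2).1)) := by
    simp only [maxTabCroise, hseed]
    rw [show ((lst.length : Int)) = (((lst.length - 1 : Nat)) : Int) + 1 by omega,
        loop1_spec lst haut (lst.length - 1) (by omega)]
    have hsl : PySem.List.slice lst none (some (((pvBmx lst (lst.length - 1)).2 : Nat) : Int))
        = lst.take (pvBmx lst (lst.length - 1)).2 := PySem.List.slice_to_natCast _ _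
    simp only [hsl, List.length_take]
    rw [show ((min (pvBmx lst (lst.length - 1)).2 lst.length : Nat) : Int)
          = (((pvBmx lst (lst.length - 1)).2 : Nat) : Int) by omega]
    rw [loop2_spec lst (pvBmx lst (lst.length - 1)).2 0 0 bas,
        down_spec lst (pvBmx lst (lst.length - 1)).2 (by omega) 0 0 bas]
    simp
  -- B's side
  have hpfx : (lst.foldl (fun (acc : List Int × Int) x => (acc.1 ++ [acc.2 + x], acc.2 + x)) (([] : List Int), (0 : Int))).1
      = (List.range lst.length).map (fun k => pvS lst (k+1)) := by
    rw [build_eq lst [] 0]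
    simp
  have hbase : (0 : Int) :: (List.range (pvBmx lst (lst.length - 1)).2).map (fun k => pvS lst (k+1))
      = (List.range ((pvBmx lst (lst.length - 1)).2 + 1)).map (fun k => pvS lst k) := by
    rw [List.range_succ_eq_map]
    simp [List.map_map, Function.comp, pvS_zero]
  have hB : maxTabCroise_alt lst bas haut =
      (if (pvMs lst (pvBmx lst (lst.length - 1)).2).1 ≤ pvS lst ((pvBmx lst (lst.length - 1)).2 + 1)
         then (((pvMs lst (pvBmx lst (lst.length - 1)).2).2 : Nat) : Int) else bas,
       (((pvBmx lst (lst.length - 1)).2 : Nat) : Int),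
       max 0 (pvS lst ((pvBmx lst (lst.length - 1)).2 + 1) - (pvMs lst (pvBmx lst (lst.length - 1)).2).1)) := by
    simp only [maxTabCroise_alt, hpfx, PySem.List.slice?_none_none_neg_one, Option.getD_some]
    rw [hmax, Option.getD_some, hidx, Option.getD_some]
    rw [show (((List.range lst.length).map (fun k => pvS lst (k+1))).length : Int) - 1
          - ((lst.length - 1 - (pvBmx lst (lst.length - 1)).2 : Nat) : Int)
          = (((pvBmx lst (lst.length - 1)).2 : Nat) : Int) by simp; omega]
    rw [PySem.List.slice_to_natCast, ← List.map_take, List.take_range, show min (pvBmx lst (lst.length - 1)).2 lst.length = (pvBmx lst (lst.length - 1)).2 by omega]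
    rw [hbase, hmin, Option.getD_some, hmidx, Option.getD_some]
    rw [PySem.List.pyGetD_natCast]
    rw [show ((List.range lst.length).map (fun k => pvS lst (k+1))).getD (pvBmx lst (lst.length - 1)).2 0
          = pvS lst ((pvBmx lst (lst.length - 1)).2 + 1) by
        simp [List.getD, show (pvBmx lst (lst.length - 1)).2 < lst.length by omega]]
    split_ifs with h1 h2 h2 <;> rw [Prod.mk.injEq, Prod.mk.injEq] <;> refine ⟨by omega, rfl, by omega⟩
  rw [hA, hB]
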